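-- pv_equiv track=rewrite | github.com/PadraigHalstead/solana-ca-screener | screening/topholders.py | check_same_amount
-- ===== SOURCE A (Python) =====
-- def check_same_amount(holders):
--     amount_counts = {}
--     for holder in holders:
--         amount = holder['amount']
--         if amount in amount_counts:
--             amount_counts[amount] += 1
--         else:
--             amount_counts[amount] = 1
--     for amount, count in amount_counts.items():
--         if count >= 3:
--             return True
--     return False
-- ===== SOURCE B (Python) =====
-- def check_same_amount(holders):
--     amounts = sorted(h['amount'] for h in holders)
--     run = 1
--     for i in range(1, len(amounts)):
--         if amounts[i] == amounts[i - 1]: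
--             run += 1
--             if run >= 3:
--                 return True
--         else:
--             run = 1
--     return False
-- ===== Notes on version B (the rewrite author's own statement) =====
-- stated objective: alternative
-- what changed: Replaces the hash-map counting pass plus a scan over the counts with sort-then-scan: sort the amounts once and return True as soon as a run of three equal consecutive values appears.
import Mathlib
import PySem

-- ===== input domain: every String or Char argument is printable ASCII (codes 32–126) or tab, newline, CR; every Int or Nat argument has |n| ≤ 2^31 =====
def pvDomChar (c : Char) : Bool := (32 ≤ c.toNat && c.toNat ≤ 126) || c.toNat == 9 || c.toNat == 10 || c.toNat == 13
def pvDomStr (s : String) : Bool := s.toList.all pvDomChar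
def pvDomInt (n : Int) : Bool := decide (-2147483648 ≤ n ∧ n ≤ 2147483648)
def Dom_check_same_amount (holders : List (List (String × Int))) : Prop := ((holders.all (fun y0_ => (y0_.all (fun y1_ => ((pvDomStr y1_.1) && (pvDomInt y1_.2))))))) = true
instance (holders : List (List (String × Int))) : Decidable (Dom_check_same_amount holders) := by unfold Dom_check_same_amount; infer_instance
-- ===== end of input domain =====

-- B replaces A's dict-counting pass with sort-then-scan for a run of three equal values;
-- same return value wherever A returns (Pre_ excludes only holders missing the 'amount' key, where both raise KeyError).

-- holder['amount'] (Python dict lookup; duplicate keys: last value wins, as in dict(pairs))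
def pvAmount (h : List (String × Int)) : Int := ((PySem.Dict.ofList h).get? "amount").getD 0

-- ===== PORT A =====
def check_same_amount (holders : List (List (String × Int))) : Bool :=
  let amount_counts := holders.foldl (fun d holder =>
    let amount := pvAmount holder
    if d.contains amount then d.insert amount (d.getD amount 0 + 1)
    else d.insert amount 1) (PySem.Dict.empty : PySem.Dict Int Int)
  amount_counts.items.any (fun p => decide (3 ≤ p.2))

-- ===== PORT B =====
def scanRun : Int → Int → List Int → Bool
  | _, _, [] => false
  | prev, run, a :: rest =>
    if a = prev then
      if 3 ≤ run + 1 then true else scanRun a (run + 1) rest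
    else scanRun a 1 rest

def check_same_amount_alt (holders : List (List (String × Int))) : Bool :=
  let amounts := PySem.List.sorted (holders.map pvAmount) (fun x => x) false
  match amounts with
  | [] => false
  | a :: rest => scanRun a 1 rest

-- ===== PRECONDITION & SPEC =====
-- Pre_ excludes exactly the holders lacking an 'amount' key, on which Python A raises KeyError.
def Pre_check_same_amount (holders : List (List (String × Int))) : Prop :=
  holders.all (fun h => h.any (fun p => p.1 == "amount")) = true
instance (holders : List (List (String × Int))) : Decidable (Pre_check_same_amount holders) := by unfold Pre_check_same_amount; infer_instance

def pvWitness_check_same_amount : (List (List (String × Int))) :=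
  [[("amount", 5)], [("amount", 5), ("x", 1)], [("amount", 5)]]

def Spec_check_same_amount (holders : List (List (String × Int))) (out : Bool) : Prop := out = check_same_amount_alt holders
instance (holders : List (List (String × Int))) (out : Bool) : Decidable (Spec_check_same_amount holders out) := by unfold Spec_check_same_amount; infer_instance

-- ===== CLAIM (what is proved, stated in full; the proofs are below) =====
def Claim_equal_check_same_amount : Prop := ∀ (holders : List (List (String × Int))), Dom_check_same_amount holders → Pre_check_same_amount holders → Spec_check_same_amount holders (check_same_amount holders)

-- ===== LEMMAS AND PROOFS =====

-- three consecutive equal values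
def hT : List Int → Bool
  | a :: b :: c :: t => (decide (a = b) && decide (b = c)) || hT (b :: c :: t)
  | _ => false

theorem scanRun_hT (l : List Int) : ∀ prev,
    (scanRun prev 1 l = hT (prev :: l)) ∧
    (scanRun prev 2 l = ((match l with | [] => false | b :: _ => decide (b = prev)) || hT (prev :: l))) := by
  induction l with
  | nil => intro prev; simp [scanRun, hT]
  | cons a t ih =>
    intro prev
    constructor
    · show scanRun prev 1 (a :: t) = hT (prev :: a :: t)
      simp only [scanRun]
      by_cases hap : a = prev
      · subst hap
        norm_num
        rw [(ih a).2]
        cases t with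
        | nil => simp [hT]
        | cons b t' => simp [hT, eq_comm]
      · rw [if_neg hap, (ih a).1]
        cases t with
        | nil => simp [hT]
        | cons b t' => simp [hT, Ne.symm hap]
    · show scanRun prev 2 (a :: t) = _
      simp only [scanRun]
      by_cases hap : a = prev
      · subst hap; norm_num
      · rw [if_neg hap, (ih a).1]
        cases t with
        | nil => simp [hT, hap]
        | cons b t' => simp [hT, hap, Ne.symm hap]

theorem hT_cons (x : Int) (t : List Int) (h : hT t = true) : hT (x :: t) = true := by
  cases t with
  | nil => simp [hT] at h
  | cons b t' =>
    cases t' with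
    | nil => simp [hT] at h
    | cons c t'' => simp [hT] at h ⊢; tauto

theorem count_ge_of_hT (s : List Int) (h : hT s = true) : ∃ a, 3 ≤ s.count a := by
  induction s with
  | nil => simp [hT] at h
  | cons a t ih =>
    cases t with
    | nil => simp [hT] at h
    | cons b t' =>
      cases t' with
      | nil => simp [hT] at h
      | cons c t'' =>
        simp only [hT, Bool.or_eq_true, Bool.and_eq_true, decide_eq_true_eq] at h
        rcases h with ⟨hab, hbc⟩ | h
        · refine ⟨a, ?_⟩
          subst hab; subst hbc
          simp
        · obtain ⟨x, hx⟩ := ih h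
          refine ⟨x, ?_⟩
          rw [List.count_cons]
          omega

theorem head_eq_of_sorted_mem (x : Int) (t : List Int)
    (hs : (x :: t).Pairwise (· ≤ ·)) (hm : x ∈ t) : ∃ t', t = x :: t' := by
  cases t with
  | nil => simp at hm
  | cons y t' =>
    rcases List.mem_cons.1 hm with h | h
    · exact ⟨t', by rw [h]⟩
    · have hxy : x ≤ y := (List.pairwise_cons.1 hs).1 y (by simp)
      have hyx : y ≤ x :=
        (List.pairwise_cons.1 (List.pairwise_cons.1 hs).2).1 x h
      exact ⟨t', by rw [le_antisymm hxy hyx]⟩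

theorem hT_of_count_ge (s : List Int) (hs : s.Pairwise (· ≤ ·))
    (h : ∃ a, 3 ≤ s.count a) : hT s = true := by
  induction s with
  | nil => obtain ⟨a, ha⟩ := h; simp at ha
  | cons x t ih =>
    obtain ⟨a, ha⟩ := h
    rw [List.count_cons] at ha
    by_cases hax : a = x
    · subst hax
      rw [if_pos (beq_self_eq_true a)] at ha
      have hmem : a ∈ t := List.count_pos_iff.1 (by omega)
      obtain ⟨t', rfl⟩ := head_eq_of_sorted_mem a t hs hmem
      rw [List.count_cons, if_pos (beq_self_eq_true a)] at ha
      have hmem' : a ∈ t' := List.count_pos_iff.1 (by omega)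
      obtain ⟨t'', rfl⟩ := head_eq_of_sorted_mem a t' (List.pairwise_cons.1 hs).2 hmem'
      simp [hT]
    · rw [if_neg (by simpa using Ne.symm hax)] at ha
      exact hT_cons x t (ih (List.pairwise_cons.1 hs).2 ⟨a, by omega⟩)

theorem foldA_eq (l : List (List (String × Int))) (d : PySem.Dict Int Int) :
    l.foldl (fun d holder =>
      if d.contains (pvAmount holder) then d.insert (pvAmount holder) (d.getD (pvAmount holder) 0 + 1)
      else d.insert (pvAmount holder) 1) d
    = (l.map pvAmount).foldl (fun d x => d.insert x (d.getD x 0 + 1)) d := by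
  induction l generalizing d with
  | nil => rfl
  | cons h t ih =>
    simp only [List.foldl_cons, List.map_cons]
    rw [← ih]
    congr 1
    by_cases hc : PySem.Dict.contains d (pvAmount h)
    · simp [hc]
    · have h0 : PySem.Dict.getD d (pvAmount h) 0 = 0 :=
        PySem.Dict.getD_of_not_contains d 0 (by simpa using hc)
      simp [hc, h0]

-- A equals the dict-counter characterisation
theorem check_same_amount_eq_exists (holders : List (List (String × Int))) :
    check_same_amount holders = true ↔ ∃ a, 3 ≤ (holders.map pvAmount).count a := by
  unfold check_same_amount
  change ((holders.foldl (fun d holder =>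
      if d.contains (pvAmount holder) then d.insert (pvAmount holder) (d.getD (pvAmount holder) 0 + 1)
      else d.insert (pvAmount holder) 1) (PySem.Dict.empty : PySem.Dict Int Int)).items.any (fun p => decide (3 ≤ p.2)) = true) ↔ _
  rw [foldA_eq holders PySem.Dict.empty, PySem.Dict.foldl_insert_getD_add_one_eq_counter, PySem.Dict.items_counter]
  simp only [List.any_map, List.any_eq_true, Function.comp]
  constructor
  · rintro ⟨a, _, ha⟩
    refine ⟨a, ?_⟩
    have := of_decide_eq_true ha
    exact_mod_cast this
  · rintro ⟨a, ha⟩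
    refine ⟨a, ?_, decide_eq_true (by exact_mod_cast ha)⟩
    rw [PySem.Set.mem_ofList]
    have : 0 < (holders.map pvAmount).count a := by omega
    exact List.count_pos_iff.1 this

theorem check_same_amount_alt_eq_exists (holders : List (List (String × Int))) :
    check_same_amount_alt holders = true ↔ ∃ a, 3 ≤ (holders.map pvAmount).count a := by
  unfold check_same_amount_alt
  have hperm : (PySem.List.sorted (holders.map pvAmount) (fun x => x) false).Perm (holders.map pvAmount) :=
    PySem.List.sorted_perm _ _ _
  have hcount : ∀ a, (PySem.List.sorted (holders.map pvAmount) (fun x => x) false).count a =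
      (holders.map pvAmount).count a := fun a => hperm.count_eq a
  have hsorted : (PySem.List.sorted (holders.map pvAmount) (fun x => x) false).Pairwise (· ≤ ·) :=
    PySem.List.sorted_pairwise _ _
  cases hh : PySem.List.sorted (holders.map pvAmount) (fun x => x) false with
  | nil =>
    simp only []
    constructor
    · intro h; simp at h
    · rintro ⟨a, ha⟩
      rw [← hcount a, hh] at ha
      simp at ha
  | cons x rest =>
    simp only []
    rw [(scanRun_hT rest x).1]
    rw [hh] at hcount hsorted
    constructor
    · intro h
      obtain ⟨a, ha⟩ := count_ge_of_hT _ h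
      exact ⟨a, by rw [← hcount a]; exact ha⟩
    · rintro ⟨a, ha⟩
      exact hT_of_count_ge _ hsorted ⟨a, by rw [hcount a]; exact ha⟩

-- ===== VERDICT (by name: the statement is the Claim_ definition above) =====
theorem check_same_amount_spec : Claim_equal_check_same_amount := by
  intro holders _ _
  unfold Spec_check_same_amount
  rw [Bool.eq_iff_iff, check_same_amount_eq_exists, check_same_amount_alt_eq_exists]
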